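-- pv_equiv track=rewrite | github.com/itachi1010/hackerrank-competition-code- | main4.py | generate_string
-- ===== SOURCE A (Python) =====
-- def generate_string(Na, Nb, Sa, Sb, K):
--     S = ""
--     current_count = 1
--
--     while True:
--         if current_count % Na == 0 and current_count % Nb == 0:
--             S += Sa + Sb
--         elif current_count % Na == 0:
--             S += Sa
--         elif current_count % Nb == 0:
--             S += Sb
--
--         if len(S) >= K:
--             return S[K - 1]
--
--         current_count += 1
-- ===== SOURCE B (Python) =====
-- def generate_string(Na, Nb, Sa, Sb, K):
--     # Binary search for the least count n whose block makes the built string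
--     # reach length K, using the closed-form cumulative length
--     # f(n) = (n // a) * len(Sa) + (n // b) * len(Sb); then index into that block.
--     a, b = abs(Na), abs(Nb)
--     la, lb = len(Sa), len(Sb)
--
--     def f(n):
--         return n // a * la + n // b * lb
--
--     lo = 0
--     hi = (a if la > 0 else b) * K   # f(hi) >= K under the precondition
--     while lo + 1 < hi:
--         mid = (lo + hi) // 2
--         if f(mid) >= K:
--             hi = mid
--         else:
--             lo = mid
--     block = (Sa if hi % a == 0 else "") + (Sb if hi % b == 0 else "")
--     return block[K - 1 - f(hi - 1)]
-- ===== Notes on version B (the rewrite author's own statement) =====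
-- stated objective: faster
-- what changed: Instead of building the string count by count until it reaches length K, B binary-searches the least count n whose cumulative length f(n) = (n//|Na|)*len(Sa) + (n//|Nb|)*len(Sb) reaches K and indexes into that single block.
-- outside the precondition, e.g. on generate_string(1, 2, 'ab', 'c', 0): A returns 'b', B returns 'c'
import Mathlib
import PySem

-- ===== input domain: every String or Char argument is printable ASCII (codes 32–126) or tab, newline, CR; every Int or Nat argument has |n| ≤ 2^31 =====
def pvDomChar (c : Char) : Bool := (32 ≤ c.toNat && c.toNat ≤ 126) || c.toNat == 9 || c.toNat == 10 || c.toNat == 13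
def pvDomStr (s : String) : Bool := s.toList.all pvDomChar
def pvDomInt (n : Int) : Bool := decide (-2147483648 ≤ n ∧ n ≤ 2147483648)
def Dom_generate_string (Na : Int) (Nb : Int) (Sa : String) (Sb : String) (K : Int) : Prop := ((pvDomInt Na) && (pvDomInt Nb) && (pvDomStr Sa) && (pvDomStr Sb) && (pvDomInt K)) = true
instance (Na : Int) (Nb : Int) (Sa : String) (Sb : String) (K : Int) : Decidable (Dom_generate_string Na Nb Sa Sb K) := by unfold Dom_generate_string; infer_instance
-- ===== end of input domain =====

-- B replaces A's count-by-count string building with a binary search on the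
-- closed-form cumulative length; equivalence is proved on Pre_ (K ≥ 1, nonzero
-- divisors, not both strings empty), where A terminates and returns normally.

-- ===== PORT A =====
-- the while-True loop of A; fuel only totalises it (under Pre_ the loop
-- returns strictly before the fuel chosen in generate_string runs out)
def genA_loop (Na Nb : Int) (A B : List Char) (K : Int) :
    Nat → Int → List Char → List Char
  | 0, _, _ => []
  | fuel + 1, count, S =>
    let S' :=
      if PySem.Int.mod count Na = 0 ∧ PySem.Int.mod count Nb = 0 then S ++ A ++ B
      else if PySem.Int.mod count Na = 0 then S ++ A
      else if PySem.Int.mod count Nb = 0 then S ++ B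
      else S
    if K ≤ (S'.length : Int) then
      match PySem.List.pyGet? S' (K - 1) with   -- S[K-1]; none = IndexError (outside Pre_)
      | some c => [c]
      | none => []
    else genA_loop Na Nb A B K fuel (count + 1) S'

def generate_string (Na : Int) (Nb : Int) (Sa : String) (Sb : String) (K : Int) : String :=
  String.mk (genA_loop Na Nb Sa.toList Sb.toList K
    (K.toNat * (Na.natAbs + Nb.natAbs) + 1) 1 [])

-- ===== PORT B =====
-- closed-form cumulative length f(n) of Source B
def genB_f (a b la lb n : Int) : Int :=
  PySem.Int.floordiv n a * la + PySem.Int.floordiv n b * lb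

-- the while lo+1<hi binary-search loop of Source B
def genB_loop (a b la lb K lo hi : Int) : Int :=
  if h : lo + 1 < hi then
    let mid := PySem.Int.floordiv (lo + hi) 2
    if K ≤ genB_f a b la lb mid then genB_loop a b la lb K lo mid
    else genB_loop a b la lb K mid hi
  else hi
termination_by (hi - lo).toNat
decreasing_by
  · have h1 : lo + 1 ≤ PySem.Int.floordiv (lo + hi) 2 :=
      (PySem.Int.le_floordiv_iff_mul_le (by omega)).mpr (by omega)
    have h2 : PySem.Int.floordiv (lo + hi) 2 < hi :=
      (PySem.Int.floordiv_lt_iff_lt_mul (by omega)).mpr (by omega)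
    omega
  · have h1 : lo + 1 ≤ PySem.Int.floordiv (lo + hi) 2 :=
      (PySem.Int.le_floordiv_iff_mul_le (by omega)).mpr (by omega)
    have h2 : PySem.Int.floordiv (lo + hi) 2 < hi :=
      (PySem.Int.floordiv_lt_iff_lt_mul (by omega)).mpr (by omega)
    omega

def generate_string_alt (Na : Int) (Nb : Int) (Sa : String) (Sb : String) (K : Int) : String :=
  let a : Int := Na.natAbs
  let b : Int := Nb.natAbs
  let A := Sa.toList
  let B := Sb.toList
  let la : Int := A.length
  let lb : Int := B.length
  let hi := genB_loop a b la lb K 0 ((if 0 < la then a else b) * K)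
  let block := (if PySem.Int.mod hi a = 0 then A else []) ++
               (if PySem.Int.mod hi b = 0 then B else [])
  match PySem.List.pyGet? block (K - 1 - genB_f a b la lb (hi - 1)) with
  | some c => String.mk [c]
  | none => ""

-- ===== PRECONDITION & SPEC =====
-- Pre_ restricts to the natural domain of the task: K ≥ 1 (A raises
-- ZeroDivisionError when Na = 0 or Nb = 0, raises IndexError or returns a
-- negative-index wraparound value when K ≤ 0, and loops forever when both
-- strings are empty).
def Pre_generate_string (Na : Int) (Nb : Int) (Sa : String) (Sb : String) (K : Int) : Prop :=
  Na ≠ 0 ∧ Nb ≠ 0 ∧ 1 ≤ K ∧ (Sa.toList ≠ [] ∨ Sb.toList ≠ [])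
instance (Na : Int) (Nb : Int) (Sa : String) (Sb : String) (K : Int) : Decidable (Pre_generate_string Na Nb Sa Sb K) := by unfold Pre_generate_string; infer_instance

def pvWitness_generate_string : Int × Int × String × String × Int := (2, 3, "ab", "c", 5)

def Spec_generate_string (Na : Int) (Nb : Int) (Sa : String) (Sb : String) (K : Int) (out : String) : Prop := out = generate_string_alt Na Nb Sa Sb K
instance (Na : Int) (Nb : Int) (Sa : String) (Sb : String) (K : Int) (out : String) : Decidable (Spec_generate_string Na Nb Sa Sb K out) := by unfold Spec_generate_string; infer_instance

-- ===== CLAIM (what is proved, stated in full; the proofs are below) =====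
def Claim_equal_generate_string : Prop := ∀ (Na : Int) (Nb : Int) (Sa : String) (Sb : String) (K : Int), Dom_generate_string Na Nb Sa Sb K → Pre_generate_string Na Nb Sa Sb K → Spec_generate_string Na Nb Sa Sb K (generate_string Na Nb Sa Sb K)

-- ===== LEMMAS AND PROOFS =====

-- Nat-level model: cumulative length, block appended at count n, built string
def pvF (a b la lb n : Nat) : Nat := n / a * la + n / b * lb

def pvBlk (a b : Nat) (A B : List Char) (n : Nat) : List Char :=
  (if a ∣ n then A else []) ++ (if b ∣ n then B else [])

def pvG (a b : Nat) (A B : List Char) : Nat → List Char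
  | 0 => []
  | n + 1 => pvG a b A B n ++ pvBlk a b A B (n + 1)

theorem pvG_length (a b : Nat) (A B : List Char) (n : Nat) :
    (pvG a b A B n).length = pvF a b A.length B.length n := by
  induction n with
  | zero => simp [pvG, pvF]
  | succ n ih =>
    simp only [pvG, List.length_append, ih, pvBlk]
    unfold pvF
    rw [Nat.succ_div, Nat.succ_div]
    by_cases hA : a ∣ n + 1 <;> by_cases hB : b ∣ n + 1 <;>
      simp [hA, hB, Nat.add_mul] <;> ring_nf

theorem pvF_mono (a b la lb : Nat) {m n : Nat} (h : m ≤ n) :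
    pvF a b la lb m ≤ pvF a b la lb n := by
  unfold pvF
  exact Nat.add_le_add
    (Nat.mul_le_mul_right _ (Nat.div_le_div_right h))
    (Nat.mul_le_mul_right _ (Nat.div_le_div_right h))

theorem pvF_cast (a b la lb : Nat) (n : Int) (hn : 0 ≤ n) :
    genB_f (a : Int) (b : Int) (la : Int) (lb : Int) n
      = ((pvF a b la lb n.toNat : Nat) : Int) := by
  obtain ⟨m, rfl⟩ : ∃ m : Nat, n = (m : Int) := ⟨n.toNat, by omega⟩
  unfold genB_f pvF
  rw [PySem.Int.floordiv_natCast, PySem.Int.floordiv_natCast]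
  simp only [Int.toNat_natCast]
  push_cast
  ring

-- Python's 'count % N == 0' is divisibility by |N| (for N ≠ 0 or not)
theorem pv_mod_iff (N : Int) (n : Nat) :
    PySem.Int.mod (n : Int) N = 0 ↔ N.natAbs ∣ n := by
  rw [PySem.Int.mod_eq_zero_iff_dvd]
  rw [← Int.natAbs_dvd]
  exact_mod_cast Int.natCast_dvd_natCast.symm

-- A's three-branch append chain is one concatenation of two optional blocks
theorem pv_if_chain (P Q : Prop) [Decidable P] [Decidable Q] (S A B : List Char) :
    (if P ∧ Q then S ++ A ++ B
     else if P then S ++ A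
     else if Q then S ++ B
     else S)
    = S ++ ((if P then A else []) ++ (if Q then B else [])) := by
  by_cases hP : P <;> by_cases hQ : Q <;> simp [hP, hQ]

-- the A loop, run from count c+1 on the string built for counts 1..c,
-- returns the (k-1)-th character of the string built for counts 1..n0
theorem genA_loop_eq (Na Nb : Int) (A B : List Char) (k n0 : Nat)
    (hk0 : k ≤ pvF Na.natAbs Nb.natAbs A.length B.length n0)
    (hmin : ∀ m, m < n0 → pvF Na.natAbs Nb.natAbs A.length B.length m < k) :
    ∀ (fuel c : Nat), pvF Na.natAbs Nb.natAbs A.length B.length c < k → n0 ≤ c + fuel →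
      genA_loop Na Nb A B (k : Int) fuel ((c : Int) + 1)
          (pvG Na.natAbs Nb.natAbs A B c)
        = (match (pvG Na.natAbs Nb.natAbs A B n0)[k - 1]? with
           | some ch => [ch]
           | none => ([] : List Char)) := by
  intro fuel
  induction fuel with
  | zero =>
    intro c hc hn0
    have h1 : pvF Na.natAbs Nb.natAbs A.length B.length n0
        ≤ pvF Na.natAbs Nb.natAbs A.length B.length c :=
      pvF_mono _ _ _ _ (by omega)
    omega
  | succ fuel ih =>
    intro c hc hn0
    have hk1 : 1 ≤ k := by omega
    show genA_loop Na Nb A B (k : Int) (fuel + 1) ((c : Int) + 1) _ = _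
    rw [genA_loop]
    have hcast : ((c : Int) + 1) = (((c + 1 : Nat) : Nat) : Int) := by push_cast; ring
    have hS' :
        (if PySem.Int.mod ((c : Int) + 1) Na = 0 ∧ PySem.Int.mod ((c : Int) + 1) Nb = 0 then
            pvG Na.natAbs Nb.natAbs A B c ++ A ++ B
          else if PySem.Int.mod ((c : Int) + 1) Na = 0 then pvG Na.natAbs Nb.natAbs A B c ++ A
          else if PySem.Int.mod ((c : Int) + 1) Nb = 0 then pvG Na.natAbs Nb.natAbs A B c ++ B
          else pvG Na.natAbs Nb.natAbs A B c)
        = pvG Na.natAbs Nb.natAbs A B (c + 1) := by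
      rw [pv_if_chain]
      have hA : (PySem.Int.mod ((c : Int) + 1) Na = 0) = (Na.natAbs ∣ c + 1) := by
        rw [hcast]; exact propext (pv_mod_iff Na (c + 1))
      have hB : (PySem.Int.mod ((c : Int) + 1) Nb = 0) = (Nb.natAbs ∣ c + 1) := by
        rw [hcast]; exact propext (pv_mod_iff Nb (c + 1))
      simp only [hA, hB]
      rfl
    simp only [hS']
    have hlen : ((pvG Na.natAbs Nb.natAbs A B (c + 1)).length : Int)
        = ((pvF Na.natAbs Nb.natAbs A.length B.length (c + 1) : Nat) : Int) := by
      exact_mod_cast pvG_length Na.natAbs Nb.natAbs A B (c + 1)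
    by_cases hreach : k ≤ pvF Na.natAbs Nb.natAbs A.length B.length (c + 1)
    · have hcond : (k : Int) ≤ ((pvG Na.natAbs Nb.natAbs A B (c + 1)).length : Int) := by
        rw [hlen]; exact_mod_cast hreach
      rw [if_pos hcond]
      have hn0eq : n0 = c + 1 := by
        have h1 : n0 ≤ c + 1 := by
          by_contra h
          exact absurd (hmin (c + 1) (by omega)) (by omega)
        have h2 : ¬ n0 ≤ c := fun h =>
          absurd (le_trans hk0 (pvF_mono _ _ _ _ h)) (by omega)
        omega
      have hidx : (k : Int) - 1 = (((k - 1 : Nat) : Nat) : Int) := by push_cast; omega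
      rw [hidx, PySem.List.pyGet?_natCast, hn0eq]
    · have hcond : ¬ (k : Int) ≤ ((pvG Na.natAbs Nb.natAbs A B (c + 1)).length : Int) := by
        rw [hlen]; exact_mod_cast hreach
      rw [if_neg hcond]
      have : ((c : Int) + 1 + 1) = (((c + 1 : Nat) : Int) + 1) := by push_cast; ring
      rw [this]
      exact ih (c + 1) (by omega) (by omega)

-- the binary search returns the least n with k ≤ pvF n
theorem genB_loop_eq (a b la lb k n0 : Nat)
    (hk0 : k ≤ pvF a b la lb n0)
    (hmin : ∀ m, m < n0 → pvF a b la lb m < k) :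
    ∀ (N : Nat) (lo hi : Int), (hi - lo).toNat ≤ N → 0 ≤ lo → lo < hi →
      genB_f (a : Int) (b : Int) (la : Int) (lb : Int) lo < (k : Int) →
      (k : Int) ≤ genB_f (a : Int) (b : Int) (la : Int) (lb : Int) hi →
      genB_loop (a : Int) (b : Int) (la : Int) (lb : Int) (k : Int) lo hi = (n0 : Int) := by
  intro N
  induction N with
  | zero => intro lo hi hN hlo hlt _ _; omega
  | succ N ih =>
    intro lo hi hN hlo hlt hflo hfhi
    rw [genB_loop]
    by_cases h : lo + 1 < hi
    · rw [dif_pos h]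
      have hmid1 : lo + 1 ≤ PySem.Int.floordiv (lo + hi) 2 :=
        (PySem.Int.le_floordiv_iff_mul_le (by omega)).mpr (by omega)
      have hmid2 : PySem.Int.floordiv (lo + hi) 2 < hi :=
        (PySem.Int.floordiv_lt_iff_lt_mul (by omega)).mpr (by omega)
      by_cases hf : (k : Int) ≤ genB_f (a : Int) (b : Int) (la : Int) (lb : Int)
          (PySem.Int.floordiv (lo + hi) 2)
      · rw [if_pos hf]
        exact ih lo _ (by omega) hlo (by omega) hflo hf
      · rw [if_neg hf]
        exact ih _ hi (by omega) (by omega) (by omega) (by omega) hfhi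
    · rw [dif_neg h]
      -- hi = lo + 1: pvF (hi-1) < k ≤ pvF hi, so hi is the least such n, = n0
      have hhi1 : 1 ≤ hi := by omega
      have hlo' : lo = hi - 1 := by omega
      rw [pvF_cast _ _ _ _ hi (by omega)] at hfhi
      rw [hlo', pvF_cast _ _ _ _ (hi - 1) (by omega)] at hflo
      have h1 : k ≤ pvF a b la lb hi.toNat := by exact_mod_cast hfhi
      have h2 : pvF a b la lb (hi - 1).toNat < k := by exact_mod_cast hflo
      have h3 : (hi - 1).toNat = hi.toNat - 1 := by omega
      rw [h3] at h2
      have hge : n0 ≤ hi.toNat := by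
        by_contra hcon
        exact absurd (hmin hi.toNat (by omega)) (by omega)
      have hle : ¬ n0 ≤ hi.toNat - 1 := fun hcon =>
        absurd (le_trans hk0 (pvF_mono _ _ _ _ hcon)) (by omega)
      omega

-- indexing the full string at k-1 lands in the block appended at count n0
theorem pvG_get (a b : Nat) (A B : List Char) (n0 k : Nat) (hn0 : 1 ≤ n0)
    (hlow : pvF a b A.length B.length (n0 - 1) ≤ k - 1) :
    (pvG a b A B n0)[k - 1]?
      = (pvBlk a b A B n0)[k - 1 - pvF a b A.length B.length (n0 - 1)]? := by
  have h : n0 = (n0 - 1) + 1 := by omega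
  rw [h]
  show (pvG a b A B (n0 - 1) ++ pvBlk a b A B (n0 - 1 + 1))[k - 1]? = _
  rw [List.getElem?_append_right (by rw [pvG_length]; exact hlow)]
  rw [pvG_length, ← h]

-- ===== VERDICT (by name: the statement is the Claim_ definition above) =====
theorem generate_string_spec : Claim_equal_generate_string := by
  intro Na Nb Sa Sb K _hdom hpre
  obtain ⟨hNa, hNb, hK, hS⟩ := hpre
  unfold Spec_generate_string
  have ha : 0 < Na.natAbs := Int.natAbs_pos.mpr hNa
  have hb : 0 < Nb.natAbs := Int.natAbs_pos.mpr hNb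
  obtain ⟨k, rfl⟩ : ∃ k : Nat, K = (k : Int) := ⟨K.toNat, by omega⟩
  have hk1 : 1 ≤ k := by omega
  -- abbreviations (plain notation, no `set`, to keep terms syntactic)
  obtain ⟨a, ha_def⟩ : ∃ a : Nat, Na.natAbs = a := ⟨Na.natAbs, rfl⟩
  obtain ⟨b, hb_def⟩ : ∃ b : Nat, Nb.natAbs = b := ⟨Nb.natAbs, rfl⟩
  rw [ha_def] at ha; rw [hb_def] at hb
  have hlab : 0 < Sa.toList.length ∨ 0 < Sb.toList.length := by
    rcases hS with h | h
    · exact Or.inl (List.length_pos_of_ne_nil h)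
    · exact Or.inr (List.length_pos_of_ne_nil h)
  -- the count W reaches cumulative length ≥ k
  set W : Nat := if 0 < Sa.toList.length then a * k else b * k with hW_def
  have hW : k ≤ pvF a b Sa.toList.length Sb.toList.length W := by
    rw [hW_def]
    by_cases hla : 0 < Sa.toList.length
    · rw [if_pos hla]
      unfold pvF
      rw [Nat.mul_div_cancel_left k ha]
      exact le_trans (Nat.le_mul_of_pos_right k hla) (Nat.le_add_right _ _)
    · have hlb : 0 < Sb.toList.length := by omega
      rw [if_neg hla]
      unfold pvF
      rw [Nat.mul_div_cancel_left k hb]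
      exact le_trans (Nat.le_mul_of_pos_right k hlb) (Nat.le_add_left _ _)
  have hex : ∃ n, k ≤ pvF a b Sa.toList.length Sb.toList.length n := ⟨W, hW⟩
  set n0 : Nat := Nat.find hex with hn0_def
  have hk0 : k ≤ pvF a b Sa.toList.length Sb.toList.length n0 := Nat.find_spec hex
  have hmin : ∀ m, m < n0 → pvF a b Sa.toList.length Sb.toList.length m < k := by
    intro m hm
    have := Nat.find_min hex hm
    omega
  have hn0W : n0 ≤ W := Nat.find_min' hex hW
  have hn0pos : 1 ≤ n0 := by
    rcases Nat.eq_zero_or_pos n0 with h | h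
    · rw [h] at hk0; simp [pvF] at hk0; omega
    · exact h
  have hWle : W ≤ k * (a + b) := by
    have h1 : a * k ≤ k * (a + b) := by
      calc a * k = k * a := Nat.mul_comm a k
        _ ≤ k * (a + b) := Nat.mul_le_mul_left k (Nat.le_add_right a b)
    have h2 : b * k ≤ k * (a + b) := by
      calc b * k = k * b := Nat.mul_comm b k
        _ ≤ k * (a + b) := Nat.mul_le_mul_left k (Nat.le_add_left b a)
    rw [hW_def]; split <;> assumption
  -- ===== A side =====
  have hAres := genA_loop_eq Na Nb Sa.toList Sb.toList k n0
    (by rw [ha_def, hb_def]; exact hk0)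
    (by rw [ha_def, hb_def]; exact hmin)
    (k * (a + b) + 1) 0 (by rw [ha_def, hb_def]; simp [pvF]; omega) (by omega)
  simp only [Nat.cast_zero, zero_add, pvG, ha_def, hb_def] at hAres
  unfold generate_string
  rw [ha_def, hb_def]
  simp only [Int.toNat_natCast]
  rw [hAres]
  -- ===== B side =====
  unfold generate_string_alt
  rw [ha_def, hb_def]
  have hWpos : 0 < W := by
    rw [hW_def]; split
    · exact Nat.mul_pos ha hk1
    · exact Nat.mul_pos hb hk1
  have hinit : ((if 0 < ((Sa.toList.length : Nat) : Int) then (a : Int) else (b : Int))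
      * (k : Int)) = ((W : Nat) : Int) := by
    rw [hW_def]
    by_cases hla : 0 < Sa.toList.length
    · rw [if_pos (by exact_mod_cast hla), if_pos hla]; push_cast; ring
    · rw [if_neg (by exact_mod_cast hla), if_neg hla]; push_cast; ring
  have hf0 : genB_f (a : Int) (b : Int) ((Sa.toList.length : Nat) : Int)
      ((Sb.toList.length : Nat) : Int) 0 < (k : Int) := by
    rw [pvF_cast _ _ _ _ 0 (le_refl 0)]
    simp [pvF]
    omega
  have hfW : (k : Int) ≤ genB_f (a : Int) (b : Int) ((Sa.toList.length : Nat) : Int)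
      ((Sb.toList.length : Nat) : Int) ((W : Nat) : Int) := by
    rw [pvF_cast _ _ _ _ _ (by positivity)]
    simp only [Int.toNat_natCast]
    exact_mod_cast hW
  have hloop := genB_loop_eq a b Sa.toList.length Sb.toList.length k n0 hk0 hmin
    ((W : Int) - 0).toNat 0 ((W : Nat) : Int) (le_refl _) (le_refl 0)
    (by exact_mod_cast hWpos) hf0 hfW
  simp only []
  rw [hinit, hloop]
  -- the block condition is divisibility
  have hbA : (PySem.Int.mod ((n0 : Nat) : Int) (a : Int) = 0) = (a ∣ n0) := by
    rw [propext (pv_mod_iff (a : Int) n0), Int.natAbs_natCast]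
  have hbB : (PySem.Int.mod ((n0 : Nat) : Int) (b : Int) = 0) = (b ∣ n0) := by
    rw [propext (pv_mod_iff (b : Int) n0), Int.natAbs_natCast]
  simp only [hbA, hbB]
  -- the index is k - 1 - pvF (n0 - 1), a nonnegative Nat
  have hlow : pvF a b Sa.toList.length Sb.toList.length (n0 - 1) ≤ k - 1 := by
    have := hmin (n0 - 1) (by omega)
    omega
  have hidx : (k : Int) - 1 - genB_f (a : Int) (b : Int) ((Sa.toList.length : Nat) : Int)
      ((Sb.toList.length : Nat) : Int) (((n0 : Nat) : Int) - 1)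
      = (((k - 1 - pvF a b Sa.toList.length Sb.toList.length (n0 - 1) : Nat) : Nat) : Int) := by
    rw [pvF_cast _ _ _ _ _ (by omega : (0:Int) ≤ ((n0 : Nat) : Int) - 1)]
    have h3 : (((n0 : Nat) : Int) - 1).toNat = n0 - 1 := by omega
    rw [h3]
    omega
  rw [hidx, PySem.List.pyGet?_natCast]
  rw [pvG_get a b Sa.toList Sb.toList n0 k hn0pos hlow]
  -- both sides are now the same match on the same option
  have hblk : ((if a ∣ n0 then Sa.toList else []) ++ if b ∣ n0 then Sb.toList else [])
      = pvBlk a b Sa.toList Sb.toList n0 := rfl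
  rw [hblk]
  cases hget : (pvBlk a b Sa.toList Sb.toList n0)[k - 1
      - pvF a b Sa.toList.length Sb.toList.length (n0 - 1)]? with
  | none => rfl
  | some ch => rfl
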